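-- pv_equiv track=rewrite | github.com/MicrosoftExcell/Network-Science | routing algorithms.py | karyncube_routing
-- ===== SOURCE A (Python) =====
-- def karyncube_routing(n,k,source,target):
--     node = source
--     route = [source[:]]
--     for i in range(n-1,-1,-1):
--         start = source[i]
--         dest = target[i]
--         if start == dest:
--             pass
--         elif start > dest:
--             clockwise = k-start + dest
--             anticlock = start - dest
--             if clockwise<=anticlock:
--                 for j in range(start+1,k):
--                     source[i] = j
--                     route.append(source[:])
--                 for j in range(dest+1):
--                     source[i] = j
--                     route.append(source[:])
--             else:
--                 for j in range(start-1,dest-1,-1):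
--                     source[i] = j
--                     route.append(source[:])
--         elif start < dest:
--             clockwise = dest - start
--             anticlock = k-dest + start
--             if clockwise<=anticlock:
--                 for j in range(start+1,dest+1):
--                     source[i] = j
--                     route.append(source[:])
--             else:
--                 for j in range(start-1,-1,-1):
--                     source[i] = j
--                     route.append(source[:])
--                 for j in range(k-1,dest-1,-1):
--                     source[i] = j
--                     route.append(source[:])
--     return route
-- ===== SOURCE B (Python) =====
-- def _dim_values(k, s, d):
--     # the value sequence one coordinate runs through (shortest rotation,
--     # ties resolved toward the increasing direction as the distances decide)
--     if s < d:
--         up, down = d - s, k - (d - s)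
--     else:
--         up, down = k - (s - d), s - d
--     if s == d:
--         return []
--     if up <= down:
--         if s < d:
--             return list(range(s + 1, d + 1))
--         return list(range(s + 1, k)) + list(range(0, d + 1))
--     if s > d:
--         return list(range(s - 1, d - 1, -1))
--     return list(range(s - 1, -1, -1)) + list(range(k - 1, d - 1, -1))
--
--
-- def karyncube_routing(n, k, source, target):
--     # purely functional: plan all per-dimension value sequences, precompute each
--     # coordinate's final value, and build every route node directly by
--     # concatenation (source prefix + stepped value + finals suffix);
--     # no running state, `source` is NOT mutated (return value only).
--     paths = [_dim_values(k, source[i], target[i]) for i in range(n)]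
--     finals = [paths[i][-1] if i < n and paths[i] else source[i]
--               for i in range(len(source))]
--     route = [list(source)]
--     for i in range(n - 1, -1, -1):
--         route.extend(source[:i] + [v] + finals[i + 1:] for v in paths[i])
--     return route
-- ===== Notes on version B (the rewrite author's own statement) =====
-- stated objective: alternative
-- what changed: B is purely functional: it precomputes every dimension's value sequence and every coordinate's final value, then constructs each route node directly by concatenation (source prefix + stepped value + finals suffix), instead of A's sequential in-place mutation of source with snapshot copies inside four branch-specific loops; B does not mutate source (return value only).
import Mathlib
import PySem

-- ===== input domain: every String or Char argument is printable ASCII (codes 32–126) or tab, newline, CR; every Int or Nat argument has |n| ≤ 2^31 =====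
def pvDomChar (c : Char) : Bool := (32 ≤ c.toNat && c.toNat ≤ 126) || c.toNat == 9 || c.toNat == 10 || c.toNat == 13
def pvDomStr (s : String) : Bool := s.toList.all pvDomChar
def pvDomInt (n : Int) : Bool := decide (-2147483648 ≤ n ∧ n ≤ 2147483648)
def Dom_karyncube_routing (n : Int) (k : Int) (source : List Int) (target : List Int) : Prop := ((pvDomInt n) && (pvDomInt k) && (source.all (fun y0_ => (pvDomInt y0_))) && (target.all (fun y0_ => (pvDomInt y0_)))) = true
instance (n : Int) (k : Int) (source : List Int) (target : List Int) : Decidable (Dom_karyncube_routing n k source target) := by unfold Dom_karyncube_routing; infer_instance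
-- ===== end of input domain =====

-- B builds the route purely functionally (planned value sequences + precomputed final
-- coordinates, each node constructed directly by concatenation) instead of A's in-place
-- mutation with snapshot copies (objective: alternative). A mutates `source` in place,
-- B does not: the equivalence proved here is about the RETURN value only.


-- ===== PORT A =====
-- state = (source, route); one `source[i] = j; route.append(source[:])` step
def pvPush (idx : Nat) (j : Int) (t : List Int × List (List Int)) : List Int × List (List Int) :=
  let s := t.1.set idx j
  (s, t.2 ++ [s])

-- body of A's outer loop for one i; i comes from range(n-1,-1,-1) so i ≥ 0, and under
-- Pre_ 0 ≤ i < len, where Python's indexing is exactly `.getD i.toNat` / `.set i.toNat`.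
def pvStepA (k : Int) (target : List Int) (t : List Int × List (List Int)) (i : Int) : List Int × List (List Int) :=
  let idx := i.toNat
  let start := t.1.getD idx 0
  let dest := target.getD idx 0
  if start = dest then t
  else if start > dest then
    let clockwise := k - start + dest
    let anticlock := start - dest
    if clockwise ≤ anticlock then
      let t1 := (PySem.List.pyRange (start+1) k 1).foldl (fun u j => pvPush idx j u) t
      (PySem.List.pyRange 0 (dest+1) 1).foldl (fun u j => pvPush idx j u) t1
    else
      (PySem.List.pyRange (start-1) (dest-1) (-1)).foldl (fun u j => pvPush idx j u) t
  else
    let clockwise := dest - start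
    let anticlock := k - dest + start
    if clockwise ≤ anticlock then
      (PySem.List.pyRange (start+1) (dest+1) 1).foldl (fun u j => pvPush idx j u) t
    else
      let t1 := (PySem.List.pyRange (start-1) (-1) (-1)).foldl (fun u j => pvPush idx j u) t
      (PySem.List.pyRange (k-1) (dest-1) (-1)).foldl (fun u j => pvPush idx j u) t1

def karyncube_routing (n : Int) (k : Int) (source : List Int) (target : List Int) : List (List Int) :=
  ((PySem.List.pyRange (n-1) (-1) (-1)).foldl (pvStepA k target) (source, [source])).2

-- ===== PORT B =====
-- _dim_values: the value sequence one coordinate runs through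
def pvDimValues (k s d : Int) : List Int :=
  let up := if s < d then d - s else k - (s - d)
  let down := if s < d then k - (d - s) else s - d
  if s = d then []
  else if up ≤ down then
    (if s < d then PySem.List.pyRange (s+1) (d+1) 1
     else PySem.List.pyRange (s+1) k 1 ++ PySem.List.pyRange 0 (d+1) 1)
  else if s > d then PySem.List.pyRange (s-1) (d-1) (-1)
  else PySem.List.pyRange (s-1) (-1) (-1) ++ PySem.List.pyRange (k-1) (d-1) (-1)

-- Source B's local lists `paths` and `finals` (indexing under Pre_ is exactly `.getD`;
-- `paths[i][-1]` is read in the branch where that list is nonempty, where it is `.getLast?.getD 0`)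
def pvPathsB (n k : Int) (source target : List Int) : List (List Int) :=
  (PySem.List.pyRange 0 n 1).map (fun i => pvDimValues k (source.getD i.toNat 0) (target.getD i.toNat 0))

def pvFinalsB (n k : Int) (source target : List Int) : List Int :=
  (List.range source.length).map (fun (i : Nat) =>
    if (i : Int) < n ∧ (pvPathsB n k source target).getD i [] ≠ [] then
      ((pvPathsB n k source target).getD i []).getLast?.getD 0
    else source.getD i 0)

def karyncube_routing_alt (n : Int) (k : Int) (source : List Int) (target : List Int) : List (List Int) :=
  (PySem.List.pyRange (n-1) (-1) (-1)).foldl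
    (fun route i => route ++ ((pvPathsB n k source target).getD i.toNat []).map
        (fun v => source.take i.toNat ++ [v] ++ (pvFinalsB n k source target).drop (i.toNat+1)))
    [source]

-- ===== PRECONDITION & SPEC =====
-- Pre_ excludes exactly the inputs where the Pythons raise IndexError (some dimension
-- index i < n reaches past a list end); with no dimensions (n ≤ 0) nothing is indexed.
def Pre_karyncube_routing (n : Int) (k : Int) (source : List Int) (target : List Int) : Prop :=
  n ≤ 0 ∨ (n ≤ (source.length : Int) ∧ n ≤ (target.length : Int))
instance (n : Int) (k : Int) (source : List Int) (target : List Int) : Decidable (Pre_karyncube_routing n k source target) := by unfold Pre_karyncube_routing; infer_instance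

def pvWitness_karyncube_routing : Int × Int × List Int × List Int := (2, 3, [1, 2], [0, 1])

def Spec_karyncube_routing (n : Int) (k : Int) (source : List Int) (target : List Int) (out : List (List Int)) : Prop := out = karyncube_routing_alt n k source target
instance (n : Int) (k : Int) (source : List Int) (target : List Int) (out : List (List Int)) : Decidable (Spec_karyncube_routing n k source target out) := by unfold Spec_karyncube_routing; infer_instance

-- ===== CLAIM (what is proved, stated in full; the proofs are below) =====
def Claim_equal_karyncube_routing : Prop := ∀ (n : Int) (k : Int) (source : List Int) (target : List Int), Dom_karyncube_routing n k source target → Pre_karyncube_routing n k source target → Spec_karyncube_routing n k source target (karyncube_routing n k source target)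

-- ===== LEMMAS AND PROOFS =====

-- the planned value sequence of dimension j
def pvPathAt (k : Int) (source target : List Int) (j : Nat) : List Int :=
  pvDimValues k (source.getD j 0) (target.getD j 0)

-- the contents of A's mutated `source` after dimensions n-1 … m have been processed
def pvS (n k : Int) (source target : List Int) (m : Nat) : List Int :=
  source.take m ++ (pvFinalsB n k source target).drop m

-- the block of snapshots dimension i contributes to the route
def pvSeg (n k : Int) (source target : List Int) (i : Int) : List (List Int) :=
  (pvPathAt k source target i.toNat).map
    (fun v => source.take i.toNat ++ [v] ++ (pvFinalsB n k source target).drop (i.toNat+1))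

theorem pvRangeSnoc (a b : Int) (h : b ≤ a) :
    PySem.List.pyRange a (b-1) (-1) = PySem.List.pyRange a b (-1) ++ [b] := by
  rw [PySem.List.pyRange_neg_one_eq_reverse, PySem.List.pyRange_neg_one_eq_reverse]
  have hb : b - 1 + 1 = b := by ring
  rw [hb, PySem.List.pyRange_one_cons (by omega : b < a + 1)]
  simp

theorem pvPathsB_getD (n k : Int) (source target : List Int) (j : Nat) (hj : (j : Int) < n) :
    (pvPathsB n k source target).getD j [] = pvPathAt k source target j := by
  unfold pvPathsB pvPathAt
  rw [List.getD_eq_getElem?_getD, List.getElem?_map, PySem.List.getElem?_pyRange_one]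
  simp [hj]

theorem pvFinalsB_getElem (n k : Int) (source target : List Int) (j : Nat) (hj : j < source.length) :
    (pvFinalsB n k source target)[j]'(by simp [pvFinalsB]; omega) =
      if (j : Int) < n ∧ (pvPathsB n k source target).getD j [] ≠ [] then
        ((pvPathsB n k source target).getD j []).getLast?.getD 0
      else source.getD j 0 := by
  simp [pvFinalsB]

theorem pvFinalsB_length (n k : Int) (source target : List Int) :
    (pvFinalsB n k source target).length = source.length := by
  simp [pvFinalsB]

-- past dimension n the final values are the untouched source values
theorem pvFinalsB_drop_eq (n k : Int) (source target : List Int) (m : Nat)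
    (hm : n ≤ (m : Int)) : (pvFinalsB n k source target).drop m = source.drop m := by
  apply List.ext_getElem
  · simp [pvFinalsB]
  · intro t h1 h2
    rw [List.getElem_drop, List.getElem_drop]
    rw [pvFinalsB_getElem n k source target (m+t) (by simp [pvFinalsB_length] at h1; omega)]
    rw [if_neg (by push_cast; omega)]
    have : m + t < source.length := by simp at h2; omega
    simp [List.getD, List.getElem?_eq_getElem this]

-- repeated `source[idx] = v; route.append(source[:])` = last value written + mapped snapshots
theorem pvFoldPush (idx : Nat) :
    ∀ (p : List Int) (S : List Int) (R : List (List Int)),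
      p.foldl (fun u v => pvPush idx v u) (S, R) =
        ((match p.getLast? with | none => S | some w => S.set idx w),
         R ++ p.map (fun v => S.set idx v)) := by
  intro p
  induction p with
  | nil => intro S R; simp
  | cons v p ih =>
    intro S R
    have hstep : pvPush idx v (S, R) = (S.set idx v, R ++ [S.set idx v]) := rfl
    rw [List.foldl_cons, hstep, ih]
    cases p with
    | nil => simp
    | cons v2 p2 =>
      simp only [List.getLast?_cons_cons, List.map_cons]
      cases h : (v2 :: p2).getLast? with
      | none => simp at h
      | some w => simp [List.set_set]

theorem pvSetMid (l1 : List Int) (a : Int) (l2 : List Int) (w : Int) :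
    (l1 ++ a :: l2).set l1.length w = l1 ++ w :: l2 := by
  induction l1 with
  | nil => rfl
  | cons x xs ih => simp [ih]

theorem pvGetDMid (l1 : List Int) (a : Int) (l2 : List Int) :
    (l1 ++ a :: l2).getD l1.length 0 = a := by
  simp [List.getD]

-- pvS at m+1, split at position m
theorem pvS_succ (n k : Int) (source target : List Int) (m : Nat) (hm : m < source.length) :
    pvS n k source target (m+1) =
      source.take m ++ source.getD m 0 :: (pvFinalsB n k source target).drop (m+1) := by
  unfold pvS
  rw [List.take_add_one]
  have h : source[m]? = some (source.getD m 0) := by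
    simp [List.getD, List.getElem?_eq_getElem hm]
  rw [h]
  simp

-- A's branch cascade of mutation loops at one dimension is the push-fold of the planned sequence
theorem pvStepA_eq_foldl (k : Int) (target : List Int) (t : List Int × List (List Int)) (i : Int) :
    pvStepA k target t i =
      (pvDimValues k (t.1.getD i.toNat 0) (target.getD i.toNat 0)).foldl
        (fun u v => pvPush i.toNat v u) t := by
  simp only [pvStepA, pvDimValues]
  split_ifs <;> first | rfl | (exfalso; omega) | (simp [List.foldl_append])

-- A's step at dimension m turns state m+1 into state m and appends that dimension's snapshots
theorem pvStep (n k : Int) (source target : List Int) (m : Nat)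
    (hm : m < source.length) (hmn : (m : Int) < n) (R : List (List Int)) :
    pvStepA k target (pvS n k source target (m+1), R) ((m : Nat) : Int) =
      (pvS n k source target m, R ++ pvSeg n k source target ((m : Nat) : Int)) := by
  have htn : ((m : Nat) : Int).toNat = m := by omega
  have hsplit := pvS_succ n k source target m hm
  have hlen : (source.take m).length = m := by simp; omega
  rw [pvStepA_eq_foldl]
  rw [htn]
  have hget0 := pvGetDMid (source.take m) (source.getD m 0) ((pvFinalsB n k source target).drop (m+1))
  rw [hlen] at hget0
  have hget : (pvS n k source target (m+1), R).1.getD m 0 = source.getD m 0 := by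
    show (pvS n k source target (m+1)).getD m 0 = _
    rw [hsplit]; exact hget0
  rw [hget]
  show (pvPathAt k source target m).foldl _ _ = _
  conv_lhs => rw [hsplit]
  rw [pvFoldPush]
  have hset : ∀ w, (source.take m ++ source.getD m 0 :: (pvFinalsB n k source target).drop (m+1)).set m w
      = source.take m ++ w :: (pvFinalsB n k source target).drop (m+1) := by
    intro w
    have h0 := pvSetMid (source.take m) (source.getD m 0) ((pvFinalsB n k source target).drop (m+1)) w
    rw [hlen] at h0
    exact h0
  have hdropm : (pvFinalsB n k source target).drop m =
      (if (m : Int) < n ∧ (pvPathsB n k source target).getD m [] ≠ [] then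
        ((pvPathsB n k source target).getD m []).getLast?.getD 0
      else source.getD m 0) :: (pvFinalsB n k source target).drop (m+1) := by
    rw [List.drop_eq_getElem_cons (by rw [pvFinalsB_length]; exact hm)]
    rw [pvFinalsB_getElem n k source target m hm]
  rw [Prod.mk.injEq]
  refine ⟨?_, ?_⟩
  · -- resulting source state = pvS m
    show _ = pvS n k source target m
    unfold pvS
    rw [hdropm, pvPathsB_getD n k source target m hmn]
    cases h : (pvPathAt k source target m).getLast? with
    | none =>
      have hnil : pvPathAt k source target m = [] := by
        cases hp : pvPathAt k source target m with
        | nil => rfl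
        | cons x xs => rw [hp] at h; simp at h
      rw [if_neg (by simp [hnil])]
    | some w =>
      have hne : pvPathAt k source target m ≠ [] := by
        intro hp; rw [hp] at h; simp at h
      rw [if_pos ⟨hmn, hne⟩]
      show (List.take m source ++ source.getD m 0 :: (pvFinalsB n k source target).drop (m+1)).set m w = _
      rw [hset w]
      rfl
  · -- appended snapshots = this dimension's segment
    show R ++ _ = R ++ pvSeg n k source target ((m : Nat) : Int)
    unfold pvSeg
    rw [htn]
    congr 1
    apply List.map_congr_left
    intro v _
    rw [hset v]
    simp

-- the key invariant: folding A's step over dimensions n-1 … n.toNat-d keeps the state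
-- at pvS and the route at [source] plus the flattened segments of the processed dimensions
theorem pvMain (n k : Int) (source target : List Int)
    (hn : 0 ≤ n) (hs : n ≤ (source.length : Int)) :
    ∀ (d : Nat), d ≤ n.toNat →
      (PySem.List.pyRange (n-1) (((n.toNat - d : Nat) : Int) - 1) (-1)).foldl
          (pvStepA k target) (source, [source]) =
        (pvS n k source target (n.toNat - d),
         [source] ++ (PySem.List.pyRange (n-1) (((n.toNat - d : Nat) : Int) - 1) (-1)).flatMap
            (pvSeg n k source target)) := by
  intro d
  induction d with
  | zero =>
    intro _
    have hnil : PySem.List.pyRange (n-1) (((n.toNat - 0 : Nat) : Int) - 1) (-1) = [] :=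
      PySem.List.pyRange_neg_one_eq_nil (by omega)
    rw [hnil]
    have hdrop := pvFinalsB_drop_eq n k source target n.toNat (by omega)
    unfold pvS
    simp [hdrop]
  | succ d ih =>
    intro hd
    have ih' := ih (by omega)
    rw [show ((n.toNat - d : Nat) : Int) - 1 = ((n.toNat - (d+1) : Nat) : Int) from by omega,
        show n.toNat - d = (n.toNat - (d+1)) + 1 from by omega] at ih'
    have hsnoc : PySem.List.pyRange (n-1) (((n.toNat - (d+1) : Nat) : Int) - 1) (-1) =
        PySem.List.pyRange (n-1) (((n.toNat - (d+1) : Nat) : Int)) (-1) ++ [((n.toNat - (d+1) : Nat) : Int)] :=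
      pvRangeSnoc _ _ (by omega)
    rw [hsnoc, List.foldl_append, List.flatMap_append, ih', List.foldl_cons, List.foldl_nil]
    rw [pvStep n k source target (n.toNat - (d+1)) (by omega) (by omega) _]
    simp

-- ===== VERDICT (by name: the statement is the Claim_ definition above) =====
theorem karyncube_routing_spec : Claim_equal_karyncube_routing := by
  intro n k source target _ hpre
  unfold Spec_karyncube_routing karyncube_routing karyncube_routing_alt
  by_cases hn : n ≤ 0
  · rw [PySem.List.pyRange_neg_one_eq_nil (by omega : n - 1 ≤ -1)]
    rfl
  · have hs : n ≤ (source.length : Int) := by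
      rcases hpre with h | h
      · omega
      · exact h.1
    have hmain := pvMain n k source target (by omega) hs n.toNat (le_refl _)
    have hz : ((n.toNat - n.toNat : Nat) : Int) - 1 = -1 := by omega
    rw [hz] at hmain
    rw [hmain, PySem.List.foldl_append_eq_flatMap]
    show [source] ++ List.flatMap (pvSeg n k source target) (PySem.List.pyRange (n-1) (-1) (-1)) = _
    congr 1
    apply List.flatMap_congr  -- g i = pvSeg i on members
    intro i hi
    have hib := (PySem.List.mem_pyRange_neg_one).1 hi
    have hjn : ((i.toNat : Nat) : Int) < n := by omega
    unfold pvSeg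
    rw [pvPathsB_getD n k source target i.toNat hjn]
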